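-- pv_equiv track=rewrite | github.com/AdriaBagueste/University_TA_Project | Data_analitics.py | GetData_Without_Columns
-- ===== SOURCE A (Python) =====
-- Useless_Columns = [0, 1, 2, 3, 4, 5, 6, 7, 12, 13, 14, 15, 16, 17, 18, 19, 20, 21, 22, 23]
--
-- def GetData_Without_Columns(data):
--     for row in data:
--         for column in sorted(Useless_Columns, reverse=True):
--             try:
--                 row.pop(column)
--             except IndexError:
--                 continue
--     return data
-- ===== SOURCE B (Python) =====
-- Useless_Columns = [0, 1, 2, 3, 4, 5, 6, 7, 12, 13, 14, 15, 16, 17, 18, 19, 20, 21, 22, 23]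
--
-- def GetData_Without_Columns(data):
--     useless = set(Useless_Columns)
--     for row in data:
--         row[:] = [v for i, v in enumerate(row) if i not in useless]
--     return data
-- ===== Notes on version B (the rewrite author's own statement) =====
-- stated objective: simpler
-- what changed: Replaces the quadratic inner loop over the descending index list with repeated try/pop by one filtered pass over each row using a precomputed set of useless column indices (slice-assigned in place).
import Mathlib
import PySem

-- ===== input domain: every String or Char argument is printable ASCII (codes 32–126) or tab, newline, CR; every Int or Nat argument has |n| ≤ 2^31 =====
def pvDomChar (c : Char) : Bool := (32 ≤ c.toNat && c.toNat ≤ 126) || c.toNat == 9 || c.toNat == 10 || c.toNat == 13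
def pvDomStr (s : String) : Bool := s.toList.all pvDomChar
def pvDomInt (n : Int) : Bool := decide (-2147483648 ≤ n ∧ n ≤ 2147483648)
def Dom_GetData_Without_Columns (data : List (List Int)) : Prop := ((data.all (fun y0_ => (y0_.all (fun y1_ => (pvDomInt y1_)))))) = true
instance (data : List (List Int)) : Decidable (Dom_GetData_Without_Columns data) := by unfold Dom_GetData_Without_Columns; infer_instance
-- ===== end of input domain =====

-- B replaces A's descending try/pop loop by one filtered pass per row with a precomputed set (simpler);
-- both A and B mutate the rows in place in Python — the equivalence proved here is about the RETURN value only.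

-- ===== PORT A =====
def pvUselessColumns : List Int := [0, 1, 2, 3, 4, 5, 6, 7, 12, 13, 14, 15, 16, 17, 18, 19, 20, 21, 22, 23]

-- 'try: row.pop(column) except IndexError: continue' — pop? = none is the IndexError, row unchanged
def pvPopTry (r : List Int) (column : Int) : List Int :=
  match PySem.List.pop? r column with
  | some (_, r') => r'
  | none => r

def GetData_Without_Columns (data : List (List Int)) : List (List Int) :=
  data.map (fun row =>
    (PySem.List.sorted pvUselessColumns (fun x => x) true).foldl pvPopTry row)

-- ===== PORT B =====
def pvUselessSet : List Int := PySem.Set.ofList pvUselessColumns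

def GetData_Without_Columns_alt (data : List (List Int)) : List (List Int) :=
  data.map (fun row =>
    ((PySem.List.enumerate row).filter (fun p => !(PySem.Set.contains pvUselessSet p.1))).map (·.2))

-- ===== PRECONDITION & SPEC =====
def Spec_GetData_Without_Columns (data : List (List Int)) (out : List (List Int)) : Prop := out = GetData_Without_Columns_alt data
instance (data : List (List Int)) (out : List (List Int)) : Decidable (Spec_GetData_Without_Columns data out) := by unfold Spec_GetData_Without_Columns; infer_instance

-- ===== CLAIM (what is proved, stated in full; the proofs are below) =====
def Claim_equal_GetData_Without_Columns : Prop := ∀ (data : List (List Int)), Dom_GetData_Without_Columns data → Spec_GetData_Without_Columns data (GetData_Without_Columns data)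

-- ===== LEMMAS AND PROOFS =====

-- descending index block [i+n-1, …, i]
def pvDescList (i : Nat) : Nat → List Nat
  | 0 => []
  | n+1 => (i + n) :: pvDescList i n

-- the try/pop step is exactly eraseIdx for a nonnegative index
theorem pvPopTry_eq_eraseIdx (r : List Int) (n : Nat) :
    pvPopTry r (n : Int) = r.eraseIdx n := by
  by_cases h : n < r.length
  · simp [pvPopTry, PySem.List.pop?_natCast (h := h)]
  · have h1 : PySem.List.pop? r (n : Int) = none := by
      simp [PySem.List.pop?, PySem.List.pyIdx?]
      omega
    have h2 : r.eraseIdx n = r := List.eraseIdx_of_length_le (by omega)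
    simp [pvPopTry, h1, h2]

theorem pvFoldPop_eq_foldErase (cs : List Nat) (l : List Int) :
    (cs.map (Nat.cast : Nat → Int)).foldl pvPopTry l = cs.foldl (fun r j => r.eraseIdx j) l := by
  induction cs generalizing l with
  | nil => rfl
  | cons c cs ih => simp only [List.map_cons, List.foldl_cons, pvPopTry_eq_eraseIdx, ih]

-- popping a descending block of indices deletes that contiguous slice
theorem pvFoldErase_desc (n i : Nat) (l : List Int) :
    (pvDescList i n).foldl (fun r j => r.eraseIdx j) l = l.take i ++ l.drop (i + n) := by
  induction n generalizing l with
  | zero => simp [pvDescList]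
  | succ n ih =>
    rw [pvDescList, List.foldl_cons, ih, List.eraseIdx_eq_take_drop_succ]
    by_cases h : l.length ≤ i + n
    · have ht : l.take (i + n) = l := List.take_of_length_le h
      have hd1 : l.drop (i + n + 1) = ([] : List Int) := List.drop_eq_nil_of_le (by omega)
      have hd2 : l.drop (i + n) = ([] : List Int) := List.drop_eq_nil_of_le h
      have hd3 : l.drop (i + (n + 1)) = ([] : List Int) := List.drop_eq_nil_of_le (by omega)
      simp [ht, hd1, hd2, hd3]
    · have hlen : (l.take (i + n)).length = i + n := by simp; omega
      rw [List.take_append, List.drop_append, hlen]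
      have e1 : (l.take (i + n)).take i = l.take i := by
        rw [List.take_take]; congr 1; omega
      have e2 : (i - (i + n)) = 0 := by omega
      have e3 : (l.take (i + n)).drop (i + n) = ([] : List Int) := List.drop_eq_nil_of_le (by omega)
      have e4 : (i + n - (i + n)) = 0 := by omega
      simp [e1, e2, e3]
      omega

-- A's per-row transform in closed form
theorem pvArow (l : List Int) :
    (PySem.List.sorted pvUselessColumns (fun x => x) true).foldl pvPopTry l
      = (l.take 12 ++ l.drop 24).drop 8 := by
  have hs : PySem.List.sorted pvUselessColumns (fun x => x) true
      = (pvDescList 12 12 ++ pvDescList 0 8).map (Nat.cast : Nat → Int) := by decide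
  rw [hs, pvFoldPop_eq_foldErase, List.foldl_append, pvFoldErase_desc, pvFoldErase_desc]
  simp

-- membership in the useless set, for a natural index
theorem pvContains_iff (n : Nat) :
    PySem.Set.contains pvUselessSet (n : Int) = true ↔ (n < 8 ∨ (12 ≤ n ∧ n < 24)) := by
  rw [PySem.Set.contains_iff]
  simp [pvUselessSet, pvUselessColumns, PySem.Set.ofList]
  omega

-- B's per-row transform, generalized over the enumerate offset
theorem pvBrow_aux (l : List Int) (n : Nat) :
    ((PySem.List.enumerate l (n : Int)).filter (fun p => !(PySem.Set.contains pvUselessSet p.1))).map (·.2)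
      = (l.take (12 - n)).drop (8 - n) ++ l.drop (24 - n) := by
  induction l generalizing n with
  | nil => simp [PySem.List.enumerate_nil]
  | cons x xs ih =>
    rw [PySem.List.enumerate_cons]
    have hc : ((n : Int) + 1) = ((n + 1 : Nat) : Int) := by push_cast; ring
    rw [hc, List.filter_cons]
    by_cases hk : n < 8 ∨ (12 ≤ n ∧ n < 24)
    · -- index is useless: dropped
      have : PySem.Set.contains pvUselessSet (n : Int) = true := (pvContains_iff n).2 hk
      simp only [this, Bool.not_true, Bool.false_eq_true, if_false]
      rw [ih]
      rcases hk with h8 | h12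
      · rw [show (12 - n) = (12 - (n+1)) + 1 from by omega,
            show (8 - n) = (8 - (n+1)) + 1 from by omega,
            show (24 - n) = (24 - (n+1)) + 1 from by omega]
        simp [List.take_succ_cons, List.drop_succ_cons]
      · rw [show (12 - n) = 0 from by omega, show (12 - (n+1)) = 0 from by omega,
            show (8 - n) = 0 from by omega, show (8 - (n+1)) = 0 from by omega,
            show (24 - n) = (24 - (n+1)) + 1 from by omega]
        simp [List.drop_succ_cons]
    · -- index is kept
      have : PySem.Set.contains pvUselessSet (n : Int) = false := by
        rw [Bool.eq_false_iff]; intro h; exact hk ((pvContains_iff n).1 h)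
      simp only [this, Bool.not_false, if_true, List.map_cons]
      rw [ih]
      rcases not_or.1 hk with ⟨h8, h12⟩
      by_cases h24 : 24 ≤ n
      · rw [show (12 - n) = 0 from by omega, show (12 - (n+1)) = 0 from by omega,
            show (8 - n) = 0 from by omega, show (8 - (n+1)) = 0 from by omega,
            show (24 - n) = 0 from by omega, show (24 - (n+1)) = 0 from by omega]
        simp
      · -- 8 ≤ n < 12
        have hn8 : 8 ≤ n := by omega
        have hn12 : n < 12 := by omega
        rw [show (12 - n) = (12 - (n+1)) + 1 from by omega,
            show (8 - n) = 0 from by omega, show (8 - (n+1)) = 0 from by omega,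
            show (24 - n) = (24 - (n+1)) + 1 from by omega]
        simp [List.take_succ_cons, List.drop_succ_cons]

-- the two closed forms coincide
theorem pvRow_eq (l : List Int) :
    ((PySem.List.enumerate l).filter (fun p => !(PySem.Set.contains pvUselessSet p.1))).map (·.2)
      = (l.take 12 ++ l.drop 24).drop 8 := by
  have hb := pvBrow_aux l 0
  simp only [Nat.cast_zero, Nat.sub_zero] at hb
  rw [hb]
  rw [List.drop_append]
  by_cases h : 8 ≤ l.length
  · have : (8 - (l.take 12).length) = 0 := by simp; omega
    rw [this]; simp
  · have h1 : l.take 12 = l := List.take_of_length_le (by omega)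
    have h2 : l.drop 24 = ([] : List Int) := List.drop_eq_nil_of_le (by omega)
    simp [h1, h2]

-- ===== VERDICT (by name: the statement is the Claim_ definition above) =====
theorem GetData_Without_Columns_spec : Claim_equal_GetData_Without_Columns := by
  intro data _
  unfold Spec_GetData_Without_Columns GetData_Without_Columns GetData_Without_Columns_alt
  apply List.map_congr_left
  intro row _
  rw [pvArow, pvRow_eq]
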